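-- pv_equiv track=rewrite | github.com/EranVazana/BlackJack-Hackaton | statistics_dashboard/app.py | calculate_data_size
-- ===== SOURCE A (Python) =====
-- def calculate_data_size(client_cards: list, server_cards: list, num_rounds: int) -> int:
--     """
--     Calculate total data size sent for a game.
--     Base size: 33 bytes
--     Client cards: first 2 cards = 3 bytes each, rest = 8 bytes each
--     Server cards: all cards = 4 bytes each
--     Round results: 1 byte per round
--     """
--     base_size = 33
--
--     # Client cards size
--     client_size = 0
--     for round_cards in client_cards:
--         for i, card in enumerate(round_cards):
--             if i < 2:
--                 client_size += 3  # First 2 cards are 3 bytes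
--             else:
--                 client_size += 8  # Hit cards are 8 bytes
--
--     # Server cards size
--     server_size = 0
--     for round_cards in server_cards:
--         for card in round_cards:
--             server_size += 4  # All server cards are 4 bytes
--
--     # Round results
--     round_results_size = num_rounds
--
--     return base_size + client_size + server_size + round_results_size
-- ===== SOURCE B (Python) =====
-- def calculate_data_size(client_cards: list, server_cards: list, num_rounds: int) -> int:
--     client_size = sum(min(2, len(r)) * 3 + max(0, len(r) - 2) * 8 for r in client_cards)
--     server_size = sum(4 * len(r) for r in server_cards)
--     return 33 + client_size + server_size + num_rounds
-- ===== Notes on version B (the rewrite author's own statement) =====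
-- stated objective: simpler
-- what changed: Replaced the nested per-card loops (with enumerate and an i<2 branch) by per-round closed-form arithmetic: each client round contributes min(2,len)*3 + max(0,len-2)*8 and each server round 4*len, summed in single comprehensions. This does O(rounds) work instead of O(cards).
import Mathlib
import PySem

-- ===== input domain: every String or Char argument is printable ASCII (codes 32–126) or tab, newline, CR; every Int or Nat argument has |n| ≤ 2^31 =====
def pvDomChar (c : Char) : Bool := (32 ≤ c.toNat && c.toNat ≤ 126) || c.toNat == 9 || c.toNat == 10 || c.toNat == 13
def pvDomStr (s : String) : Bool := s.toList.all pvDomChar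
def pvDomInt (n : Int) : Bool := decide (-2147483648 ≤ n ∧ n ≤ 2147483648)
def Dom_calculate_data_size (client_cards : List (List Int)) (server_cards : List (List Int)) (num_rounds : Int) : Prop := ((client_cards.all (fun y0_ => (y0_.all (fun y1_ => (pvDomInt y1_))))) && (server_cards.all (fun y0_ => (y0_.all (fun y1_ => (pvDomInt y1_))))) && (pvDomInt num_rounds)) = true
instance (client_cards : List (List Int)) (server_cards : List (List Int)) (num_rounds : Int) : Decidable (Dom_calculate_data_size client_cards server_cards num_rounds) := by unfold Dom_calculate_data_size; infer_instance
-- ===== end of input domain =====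

-- ===== PORT A =====
-- B replaces the nested per-card loops with per-round closed-form arithmetic (simpler).
def calculate_data_size (client_cards : List (List Int)) (server_cards : List (List Int)) (num_rounds : Int) : Int :=
  let base_size : Int := 33
  let client_size : Int := client_cards.foldl (fun cs round_cards =>
    (PySem.List.enumerate round_cards).foldl (fun cs p =>
      if p.1 < 2 then cs + 3 else cs + 8) cs) 0
  let server_size : Int := server_cards.foldl (fun ss round_cards =>
    round_cards.foldl (fun ss _ => ss + 4) ss) 0
  base_size + client_size + server_size + num_rounds

-- ===== PORT B =====
def calculate_data_size_alt (client_cards : List (List Int)) (server_cards : List (List Int)) (num_rounds : Int) : Int :=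
  let client_size : Int :=
    (client_cards.map (fun r => min 2 (r.length : Int) * 3 + max 0 ((r.length : Int) - 2) * 8)).sum
  let server_size : Int := (server_cards.map (fun r => 4 * (r.length : Int))).sum
  33 + client_size + server_size + num_rounds

-- ===== PRECONDITION & SPEC =====
def Spec_calculate_data_size (client_cards : List (List Int)) (server_cards : List (List Int)) (num_rounds : Int) (out : Int) : Prop := out = calculate_data_size_alt client_cards server_cards num_rounds
instance (client_cards : List (List Int)) (server_cards : List (List Int)) (num_rounds : Int) (out : Int) : Decidable (Spec_calculate_data_size client_cards server_cards num_rounds out) := by unfold Spec_calculate_data_size; infer_instance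

-- ===== CLAIM (what is proved, stated in full; the proofs are below) =====
def Claim_equal_calculate_data_size : Prop := ∀ (client_cards : List (List Int)) (server_cards : List (List Int)) (num_rounds : Int), Dom_calculate_data_size client_cards server_cards num_rounds → Spec_calculate_data_size client_cards server_cards num_rounds (calculate_data_size client_cards server_cards num_rounds)

-- ===== LEMMAS AND PROOFS =====

-- ===== VERDICT (by name: the statement is the Claim_ definition above) =====
-- one client round's inner enumerate-fold, closed form
lemma pv_client_round (r : List Int) (s i : Int) (hi : 0 ≤ i) :
    (PySem.List.enumerate r i).foldl (fun cs p => if p.1 < 2 then cs + 3 else cs + 8) s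
      = s + min 2 ((r.length : Int) + i) * 3 - min 2 i * 3
          + max 0 ((r.length : Int) + i - 2) * 8 - max 0 (i - 2) * 8 := by
  induction r generalizing s i with
  | nil =>
    simp only [PySem.List.enumerate_nil, List.foldl_nil, List.length_nil, Nat.cast_zero]
    omega
  | cons x xs ih =>
    rw [PySem.List.enumerate_cons, List.foldl_cons]
    by_cases h : i < 2
    · rw [if_pos h, ih (s + 3) (i + 1) (by omega)]
      simp only [List.length_cons]; push_cast; omega
    · rw [if_neg h, ih (s + 8) (i + 1) (by omega)]
      simp only [List.length_cons]; push_cast; omega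

lemma pv_client_fold (l : List (List Int)) (s : Int) :
    l.foldl (fun cs round_cards =>
      (PySem.List.enumerate round_cards).foldl (fun cs p =>
        if p.1 < 2 then cs + 3 else cs + 8) cs) s
      = s + (l.map (fun r => min 2 (r.length : Int) * 3 + max 0 ((r.length : Int) - 2) * 8)).sum := by
  induction l generalizing s with
  | nil => simp
  | cons r rs ih =>
    rw [List.foldl_cons, ih, pv_client_round r s 0 le_rfl]
    simp [List.map_cons, List.sum_cons]
    ring

lemma pv_server_round (r : List Int) (s : Int) :
    r.foldl (fun ss _ => ss + 4) s = s + 4 * (r.length : Int) := by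
  induction r generalizing s with
  | nil => simp
  | cons x xs ih =>
    rw [List.foldl_cons, ih]
    simp only [List.length_cons]; push_cast; ring

lemma pv_server_fold (l : List (List Int)) (s : Int) :
    l.foldl (fun ss round_cards => round_cards.foldl (fun ss _ => ss + 4) ss) s
      = s + (l.map (fun r => 4 * (r.length : Int))).sum := by
  induction l generalizing s with
  | nil => simp
  | cons r rs ih =>
    rw [List.foldl_cons, pv_server_round, ih]
    simp [List.map_cons, List.sum_cons]
    ring

theorem calculate_data_size_spec : Claim_equal_calculate_data_size := by
  intro client_cards server_cards num_rounds _
  unfold Spec_calculate_data_size calculate_data_size calculate_data_size_alt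
  rw [pv_client_fold, pv_server_fold]
  ring
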